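-- pv_equiv track=rewrite | github.com/Massprod/leetcode-testing | leetcode_problems/p1630_arithmetic_subarrays.py | check_arithmetic_sub
-- ===== SOURCE A (Python) =====
-- def check_arithmetic_sub(nums: list[int], l: list[int], r: list[int]) -> list[bool]:
--     # working_sol (91.61%, 98.90%) -> (158ms, 16.3mb)  time: O(m * (n * log n )) | space: O(n + m)
--     ari_seqs: list[bool] = []
--     checked: dict[tuple[int, int], bool] = {}
--     # ! m == l.length, m == r.length !
--     for y in range(len(l)):
--         # We allowed to make pairs like:
--         #  l == [0, 0, 0] , r == [len(nums] - 1, len(nums] - 1, len(nums] - 1]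
--         # So it's better to cull reuses. Sorting them and recheck is too much.
--         if (l[y], r[y]) in checked:
--             ari_seqs.append(checked[l[y], r[y]])
--             continue
--         # Arithmetic seq is always stays correct when sorted in DESC|ASCE.
--         to_check: list[int] = sorted(nums[l[y]: r[y] + 1])
--         arithmetic: bool = True
--         # ! 0 <= l[i] < r[i] < n ! <- always, at least len == 1.
--         if len(to_check) <= 2:
--             ari_seqs.append(arithmetic)
--             continue
--         diff: int = to_check[1] - to_check[0]
--         for x in range(2, len(to_check)):
--             if (to_check[x] - to_check[x - 1]) != diff:
--                 arithmetic = False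
--                 break
--         ari_seqs.append(arithmetic)
--         checked[l[y], r[y]] = arithmetic
--
--     return ari_seqs
-- ===== SOURCE B (Python) =====
-- def check_arithmetic_sub(nums: list[int], l: list[int], r: list[int]) -> list[bool]:
--     def is_ap(sub: list[int]) -> bool:
--         k = len(sub)
--         if k <= 2:
--             return True
--         mn = min(sub)
--         mx = max(sub)
--         if mn == mx:
--             return True
--         if (mx - mn) % (k - 1):
--             return False
--         step = (mx - mn) // (k - 1)
--         seen = set()
--         for v in sub:
--             q, rem = divmod(v - mn, step)
--             if rem or q in seen:
--                 return False
--             seen.add(q)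
--         return True
--     return [is_ap(nums[a:b + 1]) for a, b in zip(l, r)]
-- ===== Notes on version B (the rewrite author's own statement) =====
-- stated objective: faster
-- what changed: Per query, instead of sorting the slice and scanning adjacent differences (with a memo dict), B checks the arithmetic-progression property in one linear pass via min/max, divisibility of (max-min) by (k-1), and distinctness of the implied positions in a set.
import Mathlib
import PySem

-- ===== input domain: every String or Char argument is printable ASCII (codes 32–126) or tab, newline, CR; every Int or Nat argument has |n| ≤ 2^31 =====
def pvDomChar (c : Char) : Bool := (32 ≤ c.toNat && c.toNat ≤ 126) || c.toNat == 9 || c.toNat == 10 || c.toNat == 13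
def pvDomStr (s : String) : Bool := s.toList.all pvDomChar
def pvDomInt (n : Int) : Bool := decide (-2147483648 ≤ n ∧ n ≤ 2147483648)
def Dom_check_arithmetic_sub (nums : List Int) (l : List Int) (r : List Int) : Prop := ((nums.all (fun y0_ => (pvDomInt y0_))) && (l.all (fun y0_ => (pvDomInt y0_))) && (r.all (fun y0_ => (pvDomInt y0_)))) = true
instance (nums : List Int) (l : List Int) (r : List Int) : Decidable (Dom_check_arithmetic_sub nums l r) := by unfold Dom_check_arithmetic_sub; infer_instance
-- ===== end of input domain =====

-- B replaces A's per-query sort-and-scan (with memo dict) by a linear min/max/step + position-set check; a timing run measured the speed-up.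

-- ===== PORT A =====
-- inner 'for x in range(2, len(to_check))' with break
def aLoop (to_check : List Int) (diff : Int) : List Int → Bool
  | [] => true
  | x :: rest =>
    if PySem.List.pyGetD to_check x 0 - PySem.List.pyGetD to_check (x - 1) 0 ≠ diff then false
    else aLoop to_check diff rest

-- body of the 'for y in range(len(l))' loop: state = (ari_seqs, checked)
def aStep (nums l r : List Int) (st : List Bool × PySem.Dict (Int × Int) Bool) (y : Int) :
    List Bool × PySem.Dict (Int × Int) Bool :=
  let ly := PySem.List.pyGetD l y 0
  let ry := PySem.List.pyGetD r y 0
  match st.2.get? (ly, ry) with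
  | some b => (st.1 ++ [b], st.2)
  | none =>
    let to_check := PySem.List.sorted (PySem.List.slice nums (some ly) (some (ry + 1))) (fun x => x) false
    if to_check.length ≤ 2 then (st.1 ++ [true], st.2)
    else
      let diff := PySem.List.pyGetD to_check 1 0 - PySem.List.pyGetD to_check 0 0
      let arithmetic := aLoop to_check diff (PySem.List.pyRange 2 to_check.length 1)
      (st.1 ++ [arithmetic], st.2.insert (ly, ry) arithmetic)

def check_arithmetic_sub (nums : List Int) (l : List Int) (r : List Int) : List Bool :=
  ((PySem.List.pyRange 0 l.length 1).foldl (aStep nums l r) ([], PySem.Dict.empty)).1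

-- ===== PORT B =====
-- 'for v in sub' loop of is_ap, with the running set of positions
def bLoop (mn step : Int) (seen : PySem.Set Int) : List Int → Bool
  | [] => true
  | v :: rest =>
    let q := PySem.Int.floordiv (v - mn) step
    let rem := PySem.Int.mod (v - mn) step
    if rem ≠ 0 ∨ PySem.Set.contains seen q then false
    else bLoop mn step (PySem.Set.add seen q) rest

def bIsAp (sub : List Int) : Bool :=
  if sub.length ≤ 2 then true
  else
    let mn := (PySem.List.min? sub (fun x => x)).getD 0
    let mx := (PySem.List.max? sub (fun x => x)).getD 0
    if mn = mx then true
    else if PySem.Int.mod (mx - mn) ((sub.length : Int) - 1) ≠ 0 then false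
    else bLoop mn (PySem.Int.floordiv (mx - mn) ((sub.length : Int) - 1)) PySem.Set.empty sub

def check_arithmetic_sub_alt (nums : List Int) (l : List Int) (r : List Int) : List Bool :=
  (l.zip r).map (fun p => bIsAp (PySem.List.slice nums (some p.1) (some (p.2 + 1))))

-- ===== PRECONDITION & SPEC =====
-- Pre_ excludes exactly the inputs where A raises: 'for y in range(len(l))' reads r[y], an IndexError when len(l) > len(r).
def Pre_check_arithmetic_sub (nums : List Int) (l : List Int) (r : List Int) : Prop :=
  l.length ≤ r.length
instance (nums : List Int) (l : List Int) (r : List Int) : Decidable (Pre_check_arithmetic_sub nums l r) := by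
  unfold Pre_check_arithmetic_sub; infer_instance

def pvWitness_check_arithmetic_sub : List Int × List Int × List Int := ([1, 3, 5, 4], [0, 0], [2, 3])

def Spec_check_arithmetic_sub (nums : List Int) (l : List Int) (r : List Int) (out : List Bool) : Prop := out = check_arithmetic_sub_alt nums l r
instance (nums : List Int) (l : List Int) (r : List Int) (out : List Bool) : Decidable (Spec_check_arithmetic_sub nums l r out) := by unfold Spec_check_arithmetic_sub; infer_instance

-- ===== CLAIM (what is proved, stated in full; the proofs are below) =====
def Claim_equal_check_arithmetic_sub : Prop := ∀ (nums : List Int) (l : List Int) (r : List Int), Dom_check_arithmetic_sub nums l r → Pre_check_arithmetic_sub nums l r → Spec_check_arithmetic_sub nums l r (check_arithmetic_sub nums l r)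


-- ===== LEMMAS AND PROOFS =====

-- A's per-query value (the miss branch of aStep, as a function of the slice)
def aIsAp (sub : List Int) : Bool :=
  let t := PySem.List.sorted sub (fun x => x) false
  if t.length ≤ 2 then true
  else aLoop t (PySem.List.pyGetD t 1 0 - PySem.List.pyGetD t 0 0) (PySem.List.pyRange 2 t.length 1)

theorem aLoop_eq_true_iff (t : List Int) (diff : Int) (idxs : List Int) :
    aLoop t diff idxs = true ↔
      ∀ x ∈ idxs, PySem.List.pyGetD t x 0 - PySem.List.pyGetD t (x - 1) 0 = diff := by
  induction idxs with
  | nil => simp [aLoop]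
  | cons x rest ih =>
    simp only [aLoop, List.mem_cons]
    split
    · simp_all
    · simp_all

theorem bLoop_eq_true_iff (mn step : Int) (vs : List Int) : ∀ (seen : PySem.Set Int),
    (bLoop mn step seen vs = true ↔
      (∀ v ∈ vs, PySem.Int.mod (v - mn) step = 0) ∧
      (vs.map (fun v => PySem.Int.floordiv (v - mn) step)).Nodup ∧
      (∀ v ∈ vs, PySem.Int.floordiv (v - mn) step ∉ seen)) := by
  induction vs with
  | nil => simp [bLoop]
  | cons v rest ih =>
    intro seen
    simp only [bLoop]
    split
    · rename_i hcond
      constructor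
      · intro h; exact absurd h (by simp)
      · intro ⟨h1, h2, h3⟩
        rcases hcond with h | h
        · exact absurd (h1 v (by simp)) h
        · rw [PySem.Set.contains_iff] at h
          exact absurd h (h3 v (by simp))
    · rename_i hcond
      push_neg at hcond
      obtain ⟨hrem, hnotin⟩ := hcond
      rw [ih]
      replace hnotin : PySem.Int.floordiv (v - mn) step ∉ seen := by
        intro hm; exact hnotin ((PySem.Set.contains_iff _ _).2 hm)
      constructor
      · intro ⟨h1, h2, h3⟩
        refine ⟨?_, ?_, ?_⟩
        · intro w hw; rcases List.mem_cons.1 hw with h | h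
          · subst h; exact hrem
          · exact h1 w h
        · simp only [List.map_cons, List.nodup_cons]
          refine ⟨?_, h2⟩
          intro hmem
          obtain ⟨w, hw, hqw⟩ := List.mem_map.1 hmem
          exact (h3 w hw) (hqw ▸ (PySem.Set.mem_add _ _ _).2 (Or.inr rfl))
        · intro w hw; rcases List.mem_cons.1 hw with h | h
          · subst h; exact hnotin
          · intro hm; exact (h3 w h) ((PySem.Set.mem_add _ _ _).2 (Or.inl hm))
      · intro ⟨h1, h2, h3⟩
        refine ⟨fun w hw => h1 w (by simp [hw]), (by simp at h2; exact h2.2), ?_⟩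
        intro w hw hm
        rcases (PySem.Set.mem_add _ _ _).1 hm with h | h
        · exact h3 w (by simp [hw]) h
        · simp only [List.map_cons, List.nodup_cons] at h2
          exact h2.1 (h ▸ List.mem_map.2 ⟨w, hw, rfl⟩)

theorem A_char (sub : List Int)
    (h3 : ¬ (PySem.List.sorted sub (fun x => x) false).length ≤ 2) :
    (aIsAp sub = true) ↔
      (∀ i : Nat, i < (PySem.List.sorted sub (fun x => x) false).length →
        (PySem.List.sorted sub (fun x => x) false).getD i 0
          = (PySem.List.sorted sub (fun x => x) false).getD 0 0
            + i * ((PySem.List.sorted sub (fun x => x) false).getD 1 0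
                   - (PySem.List.sorted sub (fun x => x) false).getD 0 0)) := by
  set t := PySem.List.sorted sub (fun x => x) false with ht
  unfold aIsAp
  rw [← ht, if_neg h3, aLoop_eq_true_iff]
  simp only [PySem.List.pyGetD_ofNat', PySem.List.pyGetD_zero]
  constructor
  · intro h i hi
    induction i with
    | zero => simp
    | succ n ihn =>
      have hn := ihn (by omega)
      by_cases hn1 : n = 0
      · subst hn1; push_cast; ring
      · have hx := h ((n + 1 : Nat) : Int)
          (PySem.List.mem_pyRange_one.2 (by constructor <;> [omega; exact_mod_cast (by omega : (n+1) < t.length)]))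
        simp only [PySem.List.pyGetD_natCast] at hx
        have hcast : ((n + 1 : Nat) : Int) - 1 = ((n : Nat) : Int) := by push_cast; ring
        rw [hcast, PySem.List.pyGetD_natCast] at hx
        push_cast
        push_cast at hn
        linear_combination hx + hn
  · intro h x hx
    obtain ⟨hx1, hx2⟩ := PySem.List.mem_pyRange_one.1 hx
    lift x to Nat using (by omega)
    simp only [PySem.List.pyGetD_natCast]
    have hcast : ((x : Nat) : Int) - 1 = ((x - 1 : Nat) : Int) := by
      have : 2 ≤ x := by exact_mod_cast hx1
      push_cast [this]; omega
    rw [hcast, PySem.List.pyGetD_natCast]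
    have h1 := h x (by exact_mod_cast hx2)
    have h2 := h (x - 1) (by omega)
    have hx2' : 2 ≤ x := by exact_mod_cast hx1
    rw [Nat.cast_sub (by omega : 1 ≤ x)] at h2
    push_cast at h1 h2 ⊢
    linear_combination h1 - h2

theorem min_eq_head (sub : List Int) (hne : sub ≠ []) :
    ((PySem.List.min? sub (fun x => x)).getD 0)
      = (PySem.List.sorted sub (fun x => x) false).getD 0 0 := by
  set t := PySem.List.sorted sub (fun x => x) false with ht
  have htne : t ≠ [] := by
    intro h; exact hne ((PySem.List.sorted_eq_nil_iff _ _ _).1 (ht ▸ h))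
  obtain ⟨m, hm⟩ : ∃ m, PySem.List.min? sub (fun x => x) = some m := by
    cases hmin : PySem.List.min? sub (fun x => x) with
    | none => exact absurd ((PySem.List.min?_eq_none_iff _ _).1 hmin) hne
    | some m => exact ⟨m, rfl⟩
  rw [hm]
  obtain ⟨h0, tl, hcons⟩ := List.exists_cons_of_ne_nil htne
  have hcons' : PySem.List.sorted sub (fun x => x) false = h0 :: tl := by
    rw [← ht]; exact hcons
  have hhead : ∀ y ∈ sub, h0 ≤ y := PySem.List.key_head_sorted_le sub (fun x => x) hcons'
  have hmin_le : ∀ y ∈ sub, m ≤ y := PySem.List.min?_isMin hm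
  have hmem_m : m ∈ sub := PySem.List.min?_mem hm
  have hmem_h0 : h0 ∈ sub := (PySem.List.mem_sorted _ _ _ _).1 (by rw [← ht, hcons]; exact List.mem_cons_self)
  rw [hcons]
  simp only [List.getD, List.getElem?_cons_zero, Option.getD_some]
  exact le_antisymm (hmin_le h0 hmem_h0) (hhead m hmem_m)

theorem max_eq_last (sub : List Int) (hne : sub ≠ []) :
    ((PySem.List.max? sub (fun x => x)).getD 0)
      = (PySem.List.sorted sub (fun x => x) false).getD
          ((PySem.List.sorted sub (fun x => x) false).length - 1) 0 := by
  set t := PySem.List.sorted sub (fun x => x) false with ht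
  have htlen : t.length = sub.length := PySem.List.length_sorted _ _ _
  have htpos : 0 < t.length := by
    rw [htlen]; exact List.length_pos_of_ne_nil hne
  obtain ⟨m, hm⟩ : ∃ m, PySem.List.max? sub (fun x => x) = some m := by
    cases hmax : PySem.List.max? sub (fun x => x) with
    | none => exact absurd ((PySem.List.max?_eq_none_iff _ _).1 hmax) hne
    | some m => exact ⟨m, rfl⟩
  rw [hm]
  simp only [Option.getD_some]
  have hlast_mem : t.getD (t.length - 1) 0 ∈ t := by
    rw [List.getD_eq_getElem _ _ (by omega)]; exact List.getElem_mem _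
  have hmax_le : ∀ y ∈ sub, y ≤ m := PySem.List.max?_isMax hm
  have hmem_m : m ∈ sub := PySem.List.max?_mem hm
  have hm_t : m ∈ t := (PySem.List.mem_sorted _ _ _ _).2 hmem_m
  obtain ⟨j, hj, hjm⟩ := List.mem_iff_getElem.1 hm_t
  have hmono : m ≤ t.getD (t.length - 1) 0 := by
    rw [List.getD_eq_getElem _ _ (by omega), ← hjm]
    exact PySem.List.sorted_id_getElem_mono sub (p := j) (q := t.length - 1) (by omega) (by rw [← ht]; omega)
  have : t.getD (t.length - 1) 0 ∈ sub := (PySem.List.mem_sorted _ _ _ _).1 hlast_mem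
  exact le_antisymm hmono (hmax_le _ this)

theorem mem_bounds (sub : List Int) (hne : sub ≠ []) (v : Int) (hv : v ∈ sub) :
    (PySem.List.sorted sub (fun x => x) false).getD 0 0 ≤ v ∧
      v ≤ (PySem.List.sorted sub (fun x => x) false).getD
            ((PySem.List.sorted sub (fun x => x) false).length - 1) 0 := by
  set t := PySem.List.sorted sub (fun x => x) false with ht
  have hvt : v ∈ t := (PySem.List.mem_sorted _ _ _ _).2 hv
  obtain ⟨j, hj, hjv⟩ := List.mem_iff_getElem.1 hvt
  have h0 : t.getD 0 0 = t[0]'(by omega) := List.getD_eq_getElem _ _ (by omega)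
  have hl : t.getD (t.length - 1) 0 = t[t.length - 1]'(by omega) := List.getD_eq_getElem _ _ (by omega)
  constructor
  · rw [h0, ← hjv]
    exact PySem.List.sorted_id_getElem_mono sub (p := 0) (q := j) (by omega) (by rw [← ht]; omega)
  · rw [hl, ← hjv]
    exact PySem.List.sorted_id_getElem_mono sub (p := j) (q := t.length - 1) (by omega) (by rw [← ht]; omega)

theorem core_lemma (sub : List Int) : aIsAp sub = bIsAp sub := by
  set t := PySem.List.sorted sub (fun x => x) false with ht
  have htlen : t.length = sub.length := PySem.List.length_sorted _ _ _
  by_cases hk : sub.length ≤ 2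
  · have hA : aIsAp sub = true := by
      unfold aIsAp; rw [← ht, if_pos (by omega)]
    have hB : bIsAp sub = true := by
      unfold bIsAp; rw [if_pos hk]
    rw [hA, hB]
  · have hne : sub ≠ [] := by intro h; subst h; simp at hk
    have hk' : ¬ t.length ≤ 2 := by omega
    have hmn : (PySem.List.min? sub (fun x => x)).getD 0 = t.getD 0 0 := min_eq_head sub hne
    have hmx : (PySem.List.max? sub (fun x => x)).getD 0 = t.getD (t.length - 1) 0 := max_eq_last sub hne
    set mn := (PySem.List.min? sub (fun x => x)).getD 0 with hmndef
    set mx := (PySem.List.max? sub (fun x => x)).getD 0 with hmxdef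
    by_cases hmm : mn = mx
    · have hB : bIsAp sub = true := by
        unfold bIsAp; rw [if_neg hk]
        simp only
        rw [if_pos (by rw [← hmndef, ← hmxdef]; exact hmm)]
      rw [hB]
      rw [(A_char sub (ht ▸ hk'))]
      intro i hi
      have hconst : ∀ j : Nat, j < t.length → t.getD j 0 = mn := by
        intro j hj
        have hmem : t.getD j 0 ∈ sub := by
          rw [List.getD_eq_getElem _ _ (by omega)]
          exact (PySem.List.mem_sorted _ _ _ _).1 (List.getElem_mem _)
        have := mem_bounds sub hne _ hmem
        rw [← ht] at this
        omega
      rw [← ht] at hi ⊢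
      rw [hconst i hi, hconst 0 (by omega), hconst 1 (by omega)]
      ring
    · have hkk : (0 : Int) < (sub.length : Int) - 1 := by
        have : 3 ≤ sub.length := by omega
        omega
      have hmono : t.getD 0 0 ≤ t.getD (t.length - 1) 0 := by
        rw [List.getD_eq_getElem _ _ (by omega), List.getD_eq_getElem _ _ (by omega)]
        exact PySem.List.sorted_id_getElem_mono sub (p := 0) (q := t.length - 1) (by omega) (by rw [← ht]; omega)
      have hmnmx : mn < mx := lt_of_le_of_ne (by rw [hmn, hmx]; exact hmono) hmm
      have hkkcast : ((t.length - 1 : Nat) : Int) = (sub.length : Int) - 1 := by omega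
      by_cases hdvd : PySem.Int.mod (mx - mn) ((sub.length : Int) - 1) = 0
      case neg =>
        have hB : bIsAp sub = false := by
          unfold bIsAp; rw [if_neg hk]
          simp only
          rw [← hmndef, ← hmxdef, if_neg hmm, if_pos hdvd]
        rw [hB]
        by_contra hA
        rw [Bool.not_eq_false] at hA
        rw [A_char sub (ht ▸ hk')] at hA
        rw [← ht] at hA
        have hlast := hA (t.length - 1) (by omega)
        have hdvd' : ((sub.length : Int) - 1) ∣ (mx - mn) := by
          refine ⟨t.getD 1 0 - t.getD 0 0, ?_⟩
          rw [hmx, hmn, hlast, hkkcast]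
          ring
        exact hdvd ((PySem.Int.mod_eq_zero_iff_dvd _ _).2 hdvd')
      case pos =>
        set step := PySem.Int.floordiv (mx - mn) ((sub.length : Int) - 1) with hstepdef
        have hsum := PySem.Int.floordiv_mul_add_mod (mx - mn) ((sub.length : Int) - 1)
        rw [hdvd, ← hstepdef] at hsum
        have hstepeq : step * ((sub.length : Int) - 1) = mx - mn := by omega
        have hstep_pos : 0 < step := by nlinarith
        have hB : bIsAp sub = bLoop mn step PySem.Set.empty sub := by
          unfold bIsAp; rw [if_neg hk]
          simp only
          rw [← hmndef, ← hmxdef, if_neg hmm, if_neg (by simpa using hdvd), ← hstepdef]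
        rw [hB, Bool.eq_iff_iff, A_char sub (ht ▸ hk'), bLoop_eq_true_iff, ← ht]
        have hqval : ∀ i : Nat, PySem.Int.floordiv ((i : Int) * step) step = (i : Int) := by
          intro i
          rw [PySem.Int.floordiv_eq_ediv_of_pos hstep_pos, Int.mul_ediv_cancel _ (ne_of_gt hstep_pos)]
        constructor
        · intro hformula
          have hd : t.getD 1 0 - t.getD 0 0 = step := by
            have hlast := hformula (t.length - 1) (by omega)
            have h1 : ((sub.length : Int) - 1) * (t.getD 1 0 - t.getD 0 0)
                = ((sub.length : Int) - 1) * step := by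
              have : mx - mn = ((t.length - 1 : Nat) : Int) * (t.getD 1 0 - t.getD 0 0) := by
                rw [hmx, hmn, hlast]; ring
              rw [hkkcast] at this
              linear_combination - this - hstepeq
            exact mul_left_cancel₀ (by omega) h1
          have hval : ∀ v ∈ sub, ∃ i : Nat, i < t.length ∧ v = mn + (i : Int) * step := by
            intro v hv
            have hvt : v ∈ t := (PySem.List.mem_sorted _ _ _ _).2 hv
            obtain ⟨j, hj, hjv⟩ := List.mem_iff_getElem.1 hvt
            refine ⟨j, by omega, ?_⟩
            have hthis := hformula j (by omega)
            rw [List.getD_eq_getElem _ _ (by omega)] at hthis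
            rw [← hjv, hthis, hd, hmn]
          have hq : ∀ v ∈ sub, v = mn + PySem.Int.floordiv (v - mn) step * step := by
            intro v hv
            obtain ⟨i, _, hiv⟩ := hval v hv
            rw [hiv]
            simp only [add_sub_cancel_left, hqval]
          refine ⟨?_, ?_, by simp [PySem.Set.empty]⟩
          · intro v hv
            obtain ⟨i, _, hiv⟩ := hval v hv
            rw [hiv, add_sub_cancel_left]
            exact (PySem.Int.mod_eq_zero_iff_dvd _ _).2 ⟨i, mul_comm _ _⟩
          · have htpair : t.Pairwise (· < ·) := by
              rw [List.pairwise_iff_getElem]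
              intro a b ha hb hab
              have hfa := hformula a (by omega)
              have hfb := hformula b (by omega)
              rw [List.getD_eq_getElem _ _ (by omega)] at hfa
              rw [List.getD_eq_getElem _ _ (by omega)] at hfb
              rw [hfa, hfb, hd]
              have : (a : Int) < (b : Int) := by exact_mod_cast hab
              nlinarith
            have hsubnd : sub.Nodup := by
              have := (PySem.List.sorted_perm sub (fun x => x) false).nodup_iff
              rw [← ht] at this
              exact this.1 (htpair.imp ne_of_lt)
            refine (List.nodup_map_iff_inj_on hsubnd).2 ?_
            intro v1 hv1 v2 hv2 heq
            have e1 := hq v1 hv1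
            have e2 := hq v2 hv2
            rw [e1, e2, heq]
        · rintro ⟨h1, h2, -⟩
          have hform : ∀ v ∈ sub, v = mn + PySem.Int.floordiv (v - mn) step * step := by
            intro v hv
            have hs := PySem.Int.floordiv_mul_add_mod (v - mn) step
            rw [h1 v hv] at hs
            omega
          have hbnd : ∀ v ∈ sub, 0 ≤ PySem.Int.floordiv (v - mn) step ∧
              PySem.Int.floordiv (v - mn) step ≤ (sub.length : Int) - 1 := by
            intro v hv
            have hb := mem_bounds sub hne v hv
            rw [← ht, ← hmn, ← hmx] at hb
            have he := hform v hv
            constructor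
            · nlinarith [he, hb.1, hstep_pos]
            · nlinarith [he, hb.2, hstepeq, hstep_pos]
          have hsubset : (sub.map fun v => PySem.Int.floordiv (v - mn) step) ⊆
              (List.range sub.length).map (fun j : Nat => (j : Int)) := by
            intro x hx
            obtain ⟨v, hv, rfl⟩ := List.mem_map.1 hx
            have hb := hbnd v hv
            have hjlt : (PySem.Int.floordiv (v - mn) step).toNat < sub.length := by omega
            have hjeq : ((PySem.Int.floordiv (v - mn) step).toNat : Int)
                = PySem.Int.floordiv (v - mn) step := by omega
            exact List.mem_map.2 ⟨_, List.mem_range.2 hjlt, hjeq⟩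
          have hqperm : (sub.map fun v => PySem.Int.floordiv (v - mn) step).Perm
              ((List.range sub.length).map (fun j : Nat => (j : Int))) :=
            (List.subperm_of_subset h2 hsubset).perm_of_length_le (by simp)
          have hmapped := hqperm.map (fun x => mn + x * step)
          rw [List.map_map] at hmapped
          have hleft : sub.map ((fun x => mn + x * step) ∘ fun v => PySem.Int.floordiv (v - mn) step) = sub := by
            have := List.map_congr_left (l := sub)
              (f := (fun x => mn + x * step) ∘ fun v => PySem.Int.floordiv (v - mn) step)
              (g := id) (fun v hv => (hform v hv).symm)
            rw [this, List.map_id]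
          rw [hleft] at hmapped
          have hpair0 : ((List.range sub.length).map (fun j : Nat => (j : Int))).Pairwise
              (fun a b : Int => a < b) :=
            List.Pairwise.map _ (fun a b hab => by exact_mod_cast hab) List.pairwise_lt_range
          have hpair := List.Pairwise.map (fun x => mn + x * step)
            (fun a b hab => by show mn + a * step < mn + b * step; nlinarith) hpair0
          have hteq : t = ((List.range sub.length).map fun j : Nat => (j : Int)).map
              (fun x => mn + x * step) := by
            rw [ht]
            exact PySem.List.sorted_eq_of_perm_of_pairwise_lt _ _ _ hmapped.symm hpair
          have hgt : ∀ j : Nat, j < sub.length → t.getD j 0 = mn + (j : Int) * step := by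
            intro j hj
            rw [hteq, List.getD_eq_getElem _ _ (by simpa using hj)]
            simp [List.getElem_map]
          intro i hi
          rw [hgt i (by omega), hgt 0 (by omega), hgt 1 (by omega)]
          push_cast; ring

theorem foldl_aStep (nums l r : List Int) (ys : List Int) :
    ∀ (acc : List Bool) (d : PySem.Dict (Int × Int) Bool),
    (∀ a b v, d.get? (a, b) = some v → v = aIsAp (PySem.List.slice nums (some a) (some (b + 1)))) →
    (ys.foldl (aStep nums l r) (acc, d)).1
      = acc ++ ys.map (fun y => aIsAp (PySem.List.slice nums (some (PySem.List.pyGetD l y 0)) (some (PySem.List.pyGetD r y 0 + 1)))) := by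
  induction ys with
  | nil => intro acc d _; simp
  | cons y ys ih =>
    intro acc d hinv
    simp only [List.foldl_cons, List.map_cons]
    have hstep : aStep nums l r (acc, d) y =
        (acc ++ [aIsAp (PySem.List.slice nums (some (PySem.List.pyGetD l y 0)) (some (PySem.List.pyGetD r y 0 + 1)))],
         (aStep nums l r (acc, d) y).2) ∧
        (∀ a b v, (aStep nums l r (acc, d) y).2.get? (a, b) = some v →
          v = aIsAp (PySem.List.slice nums (some a) (some (b + 1)))) := by
      unfold aStep
      simp only
      cases hmatch : d.get? (PySem.List.pyGetD l y 0, PySem.List.pyGetD r y 0) with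
      | some b =>
        simp only [hmatch]
        refine ⟨by rw [hinv _ _ _ hmatch], hinv⟩
      | none =>
        simp only [hmatch]
        unfold aIsAp
        split
        · exact ⟨by simp_all, hinv⟩
        · refine ⟨by simp_all, ?_⟩
          intro a b v hget
          by_cases hk : (a, b) = (PySem.List.pyGetD l y 0, PySem.List.pyGetD r y 0)
          · injection hk with ha hb
            subst ha; subst hb
            rw [PySem.Dict.get?_insert_self] at hget
            simp_all
          · rw [PySem.Dict.get?_insert_of_ne (hne := hk)] at hget
            exact hinv _ _ _ hget
    have := ih (aStep nums l r (acc, d) y).1 (aStep nums l r (acc, d) y).2 hstep.2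
    calc (List.foldl (aStep nums l r) (aStep nums l r (acc, d) y) ys).1
        = (aStep nums l r (acc, d) y).1 ++ _ := this
      _ = _ := by rw [congrArg Prod.fst hstep.1]; simp

theorem fold_lemma (nums l r : List Int) (hlr : l.length ≤ r.length) :
    check_arithmetic_sub nums l r
      = (l.zip r).map (fun p => aIsAp (PySem.List.slice nums (some p.1) (some (p.2 + 1)))) := by
  unfold check_arithmetic_sub
  rw [foldl_aStep nums l r _ [] PySem.Dict.empty (by intro a b v h; simp [pysem] at h)]
  rw [List.nil_append, PySem.List.pyRange_zero_nat, List.map_map]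
  apply List.ext_getElem
  · simp; omega
  · intro i h1 h2
    simp only [List.length_map, List.length_range] at h1
    simp [List.getElem_zip, List.getElem?_eq_getElem h1,
      List.getElem?_eq_getElem (show i < r.length by omega)]

-- ===== VERDICT (by name: the statement is the Claim_ definition above) =====
theorem check_arithmetic_sub_spec : Claim_equal_check_arithmetic_sub := by
  intro nums l r _ hpre
  unfold Spec_check_arithmetic_sub check_arithmetic_sub_alt
  rw [fold_lemma nums l r hpre]
  exact List.map_congr_left (fun p _ => core_lemma _)
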